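-- pv_equiv track=rewrite | github.com/david-boehm/darts | src/darts.py | set_start_player
-- ===== SOURCE A (Python) =====
-- def set_start_player(
--     players: list[str], start_player: int, sets: dict[str, int], legs: dict[str, int]
-- ) -> list[str]:
--     # sets, legs = self.scoreboard.get_won_sets_and_legs()
--     shift_legs = sum(legs.values()) % len(players)
--     shift_sets = sum(sets.values()) % len(players)
--     # if shift_sets + shift_legs + start_player == len(players):
--     #   return players
--     rotated_players = players.copy()
--     for i in range((shift_sets + shift_legs + start_player) % len(players)):
--         rotated_players.append(rotated_players.pop(0))
--     return rotated_players
-- ===== SOURCE B (Python) =====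
-- def set_start_player(
--     players: list[str], start_player: int, sets: dict[str, int], legs: dict[str, int]
-- ) -> list[str]:
--     shift = (sum(sets.values()) + sum(legs.values()) + start_player) % len(players)
--     return players[shift:] + players[:shift]
-- ===== Notes on version B (the rewrite author's own statement) =====
-- stated objective: simpler
-- what changed: replaces the shift-times pop(0)/append mutation loop with a single combined modulus and one slice concatenation players[shift:] + players[:shift]
import Mathlib
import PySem

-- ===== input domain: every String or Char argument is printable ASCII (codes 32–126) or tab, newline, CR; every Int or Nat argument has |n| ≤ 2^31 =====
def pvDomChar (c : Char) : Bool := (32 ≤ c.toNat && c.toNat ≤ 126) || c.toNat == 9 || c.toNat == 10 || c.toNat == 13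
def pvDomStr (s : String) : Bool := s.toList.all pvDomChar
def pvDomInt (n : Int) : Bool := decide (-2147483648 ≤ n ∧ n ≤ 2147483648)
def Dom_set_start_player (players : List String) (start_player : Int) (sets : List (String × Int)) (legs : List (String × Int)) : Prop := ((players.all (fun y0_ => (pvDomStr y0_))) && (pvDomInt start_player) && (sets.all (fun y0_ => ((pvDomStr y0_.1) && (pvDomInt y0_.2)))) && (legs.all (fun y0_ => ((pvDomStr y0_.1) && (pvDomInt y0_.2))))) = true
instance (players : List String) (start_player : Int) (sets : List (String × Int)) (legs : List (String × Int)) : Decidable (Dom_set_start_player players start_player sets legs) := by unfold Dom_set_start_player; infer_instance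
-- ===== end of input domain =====

-- B replaces A's shift-times pop(0)/append rotation loop with one combined modulus and a slice concatenation (simpler, single pass).


-- ===== PORT A =====
-- one rotation step: rotated.append(rotated.pop(0))
def pvRotStep (l : List String) : List String :=
  match PySem.List.pop? l 0 with
  | some (x, rest) => rest ++ [x]
  | none => l

def set_start_player (players : List String) (start_player : Int) (sets : List (String × Int)) (legs : List (String × Int)) : List String :=
  let n : Int := players.length
  let shift_legs := PySem.Int.mod ((PySem.Dict.ofList legs).values.sum) n
  let shift_sets := PySem.Int.mod ((PySem.Dict.ofList sets).values.sum) n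
  (PySem.List.pyRange 0 (PySem.Int.mod (shift_sets + shift_legs + start_player) n) 1).foldl
    (fun rotated _ => pvRotStep rotated) players

-- ===== PORT B =====
def set_start_player_alt (players : List String) (start_player : Int) (sets : List (String × Int)) (legs : List (String × Int)) : List String :=
  let shift := PySem.Int.mod ((PySem.Dict.ofList sets).values.sum + (PySem.Dict.ofList legs).values.sum + start_player) (players.length : Int)
  PySem.List.slice players (some shift) none ++ PySem.List.slice players none (some shift)

-- ===== PRECONDITION & SPEC =====
-- Pre_ excludes only the empty player list, on which A raises ZeroDivisionError.
def Pre_set_start_player (players : List String) (start_player : Int) (sets : List (String × Int)) (legs : List (String × Int)) : Prop := players ≠ []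
instance (players : List String) (start_player : Int) (sets : List (String × Int)) (legs : List (String × Int)) : Decidable (Pre_set_start_player players start_player sets legs) := by unfold Pre_set_start_player; infer_instance
def pvWitness_set_start_player : List String × Int × (List (String × Int)) × (List (String × Int)) := (["a", "b", "c"], 1, [("a", 2)], [("b", 3)])

def Spec_set_start_player (players : List String) (start_player : Int) (sets : List (String × Int)) (legs : List (String × Int)) (out : List String) : Prop := out = set_start_player_alt players start_player sets legs
instance (players : List String) (start_player : Int) (sets : List (String × Int)) (legs : List (String × Int)) (out : List String) : Decidable (Spec_set_start_player players start_player sets legs out) := by unfold Spec_set_start_player; infer_instance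

-- ===== CLAIM (what is proved, stated in full; the proofs are below) =====
def Claim_equal_set_start_player : Prop := ∀ (players : List String) (start_player : Int) (sets : List (String × Int)) (legs : List (String × Int)), Dom_set_start_player players start_player sets legs → Pre_set_start_player players start_player sets legs → Spec_set_start_player players start_player sets legs (set_start_player players start_player sets legs)

-- ===== LEMMAS AND PROOFS =====

-- folding a constant step over a list is iteration by its length
theorem pv_foldl_const {α β : Type} (f : α → α) (l : List β) (a : α) :
    l.foldl (fun acc _ => f acc) a = f^[l.length] a := by
  induction l generalizing a with
  | nil => rfl
  | cons x xs ih => simp [List.foldl, ih, Function.iterate_succ_apply]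

-- m single rotations = drop/take split at m
theorem pv_iter_rot (xs : List String) : ∀ m, m ≤ xs.length →
    pvRotStep^[m] xs = xs.drop m ++ xs.take m := by
  intro m
  induction m with
  | zero => simp
  | succ m ih =>
    intro hm
    have hm' : m < xs.length := by omega
    rw [Function.iterate_succ_apply', ih (by omega)]
    have hdrop : xs.drop m = xs[m] :: xs.drop (m + 1) := by
      rw [List.drop_eq_getElem_cons hm']
    rw [hdrop]
    simp only [List.cons_append, pvRotStep, PySem.List.pop?_zero_cons, List.append_assoc]
    congr 1
    rw [List.take_succ, List.getElem?_eq_getElem hm']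
    rfl

-- the two modulus computations agree
theorem pv_mod_combine (a b c n : Int) (hn : 0 < n) :
    PySem.Int.mod (PySem.Int.mod a n + PySem.Int.mod b n + c) n = PySem.Int.mod (a + b + c) n := by
  rw [PySem.Int.mod_eq_emod_of_pos hn, PySem.Int.mod_eq_emod_of_pos hn,
      PySem.Int.mod_eq_emod_of_pos hn, PySem.Int.mod_eq_emod_of_pos hn]
  conv_rhs => rw [Int.add_emod, Int.add_emod a b]
  conv_lhs => rw [Int.add_emod, Int.add_emod (a % n) (b % n)]
  simp [Int.emod_emod_of_dvd]

-- ===== VERDICT =====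
theorem set_start_player_spec : Claim_equal_set_start_player := by
  intro players start_player sets legs _ hpre
  unfold Spec_set_start_player set_start_player set_start_player_alt
  have hn : 0 < (players.length : Int) := by
    have : players.length ≠ 0 := fun h => hpre (List.eq_nil_of_length_eq_zero h)
    omega
  set n : Int := (players.length : Int) with hndef
  set a : Int := (PySem.Dict.ofList legs).values.sum
  set b : Int := (PySem.Dict.ofList sets).values.sum
  set k : Int := PySem.Int.mod (b + a + start_player) n with hk
  have hcomb : PySem.Int.mod (PySem.Int.mod b n + PySem.Int.mod a n + start_player) n = k := by
    rw [hk]; exact pv_mod_combine b a start_player n hn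
  simp only [hcomb]
  have hk0 : 0 ≤ k := by
    rw [hk, PySem.Int.mod_eq_emod_of_pos hn]; exact Int.emod_nonneg _ (by omega)
  have hklt : k < n := by
    rw [hk, PySem.Int.mod_eq_emod_of_pos hn]; exact Int.emod_lt_of_pos _ hn
  have hle : k.toNat ≤ players.length := by omega
  rw [pv_foldl_const, PySem.List.length_pyRange_one, pv_iter_rot players _ (by omega : (k - 0).toNat ≤ players.length)]
  rw [PySem.List.slice_from _ hk0, PySem.List.slice_to _ hk0]
  simp
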